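/- GENERATED by farm/mkstatement.py from design/units.tsv (unit `inverse_mdct.7`) and the assertions of Vorbis/Spec/MdctTop.lean — do not edit.
   THE STATEMENT of the proof unit `inverse_mdct.7`: segment 7 of `inverse_mdct` (76 instructions; entries 0x1098f2;
   exits 0x109adb; ranges 0x1098ad-0x1099b4)
   takes each of its entry assertions to one of its exit assertions (`Vorbis.Spec.inverse_mdct.Seg7`), given the contracts of its callees.
   What the names mean: Vorbis/Spec/Basic.lean (the shared hypotheses), Vorbis/Spec/MdctTop.lean (the assertions). The theorem to prove:
   `theorem inverse_mdct_7_ok : Vorbis.Spec.inverse_mdct_7.Statement`. -/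
import Vorbis.Spec.Mdct
import Vorbis.Spec.MdctTop
namespace Vorbis.Spec.inverse_mdct_7
open X86 X86.User Asan

/-- The statement of unit `inverse_mdct.7`. -/
def Statement : Prop :=
  ∀ (Lay : Layout) (_hLay : Lay.hi = 0x1000000) (μ : Microarch) (_hμ : UserX.MicroOK μ) (u₀ : State)
    (_hcode : HasCodeNat Lay u₀ Vorbis.L.inverse_mdct.entry Vorbis.Code.code_inverse_mdct.nat Vorbis.L.inverse_mdct.size)
    (_h_imdct_step3_inner_s_loop : ∀ (others : List Obj) (frames : List (Nat × FrameLayout)) (len i0 koff k0 aoff : Nat), Calls Lay μ Vorbis.WayInv (Vorbis.conv u₀) Vorbis.L.imdct_step3_inner_s_loop.entry (Vorbis.Spec.imdct_step3_inner_s_loop.spec others frames len i0 koff k0 aoff))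
    (_h_imdct_step3_inner_s_loop_ld654 : ∀ (others : List Obj) (frames : List (Nat × FrameLayout)) (len i0 : Nat), Calls Lay μ Vorbis.WayInv (Vorbis.conv u₀) Vorbis.L.imdct_step3_inner_s_loop_ld654.entry (Vorbis.Spec.imdct_step3_inner_s_loop_ld654.spec others frames len i0))
    (_h_asan_load8_noabort : Asan.SmallCheck Lay μ Vorbis.WayInv (Vorbis.CodeOK u₀) [.rax, .rcx, .rdx] 8 Vorbis.L.__asan_load8_noabort.entry),
    Vorbis.Spec.inverse_mdct.Seg7 Lay μ u₀

end Vorbis.Spec.inverse_mdct_7
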